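-- pv_equiv track=rewrite | github.com/cajammyeon/first-year-uom | COMP16321_Prog_1_Cwk_03/race_solution.py | sorting_hat
-- ===== SOURCE A (Python) =====
-- def sorting_hat(score_dict, draw_reference, boattype_sorted) :
--
--     sorted_score = dict(sorted(score_dict.items(), key=lambda item: item[1]))
--     keys = list(sorted_score.keys())
--
--     tie_breaker = (boattype_sorted[len(boattype_sorted)-1]).split('-')
--     for i in tie_breaker :
--         tie_breaker[tie_breaker.index(i)] = i[0:2]
--     tie_breaker = tie_breaker[1:]
--
--     if len(draw_reference) > 0 :
--
--         for i in draw_reference :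
--
--             draw_team = []
--             ref_list = []
--
--             for key, value in sorted_score.items() :
--                 if value == i :
--                     draw_team.append(key)
--
--             for j in keys :
--                 if j in draw_team :
--                     ref_index = keys.index(j)
--                     break
--
--             for j in draw_team :
--                 keys.remove(j)
--
--             ref_position = 0
--             while ref_position < len(tie_breaker) :
--                 if tie_breaker[ref_position] in draw_team :
--                     ref_list.append(tie_breaker[ref_position])
--                 ref_position += 1
--
--             ref_insert = 0
--             while ref_insert < len(ref_list) :
--                 keys.insert(ref_index, ref_list[ref_insert])
--                 ref_index += 1
--                 ref_insert += 1
--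
--     return keys
-- ===== SOURCE B (Python) =====
-- def sorting_hat(score_dict, draw_reference, boattype_sorted):
--     # Group teams by score in one sorted pass; reorder each drawn group by tie-breaker order.
--     tie_breaker = [part[:2] for part in boattype_sorted[-1].split('-')][1:]
--     draws = set(draw_reference)
--     groups = []          # (score, names) blocks in ascending-score order
--     pos = {}             # score -> position in groups
--     for name, score in sorted(score_dict.items(), key=lambda item: item[1]):
--         p = pos.get(score)
--         if p is None:
--             pos[score] = len(groups)
--             groups.append((score, [name]))
--         else:
--             groups[p] = (score, groups[p][1] + [name])
--     result = []
--     for score, names in groups: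
--         if score in draws:
--             members = set(names)
--             result.extend(n for n in tie_breaker if n in members)
--         else:
--             result.extend(names)
--     return result
-- ===== Notes on version B (the rewrite author's own statement) =====
-- stated objective: faster
-- what changed: B sorts once, groups teams by score in a single pass and emits each drawn group reordered by a tie-breaker membership filter, replacing A's per-draw rescan of the whole dict plus list.index/remove/insert surgery on the keys list.
-- outside the precondition, e.g. on sorting_hat({'xy': 1}, [1, 1], ['8-xy-xy']): A returns ['xy', 'xy', 'xy'], B returns ['xy', 'xy']; on sorting_hat({'xy': 1}, [1, 1], ['8-zz']): A raises ValueError, B returns []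
import Mathlib
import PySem

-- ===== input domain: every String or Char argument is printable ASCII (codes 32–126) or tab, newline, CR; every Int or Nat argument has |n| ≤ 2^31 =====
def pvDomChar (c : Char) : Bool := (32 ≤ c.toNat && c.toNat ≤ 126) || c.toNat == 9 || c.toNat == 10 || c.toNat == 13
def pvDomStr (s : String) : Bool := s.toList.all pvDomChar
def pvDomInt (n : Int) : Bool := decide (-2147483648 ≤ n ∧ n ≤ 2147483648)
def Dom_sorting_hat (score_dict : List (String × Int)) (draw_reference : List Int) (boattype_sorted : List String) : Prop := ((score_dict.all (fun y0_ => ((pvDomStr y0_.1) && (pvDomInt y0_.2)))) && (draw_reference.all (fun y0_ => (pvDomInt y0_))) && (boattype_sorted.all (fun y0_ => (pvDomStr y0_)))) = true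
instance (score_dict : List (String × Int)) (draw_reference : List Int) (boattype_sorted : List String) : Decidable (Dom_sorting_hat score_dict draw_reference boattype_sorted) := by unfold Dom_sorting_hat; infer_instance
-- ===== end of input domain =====

-- B groups the teams by score in ONE pass over the sorted items and reorders each drawn
-- group by tie-breaker order, instead of A's per-draw rescan/remove/insert of the keys list.

-- ===== PORT A =====
-- 'for j in keys: if j in draw_team: ref_index = keys.index(j); break'
def pvFindRef (keys draw_team : List String) : List String → Option Nat
  | [] => none
  | j :: rest =>
      if draw_team.contains j then PySem.List.index? keys j
      else pvFindRef keys draw_team rest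

def sorting_hat (score_dict : List (String × Int)) (draw_reference : List Int) (boattype_sorted : List String) : List String :=
  let sorted_items := PySem.List.sorted score_dict (fun item => item.2)
  let sorted_score := sorted_items.foldl (fun d kv => d.insert kv.1 kv.2) PySem.Dict.empty
  let keys0 := sorted_score.keys
  let lastBoat := (PySem.List.pyGet? boattype_sorted ((boattype_sorted.length : Int) - 1)).getD ""
  let tb0 := (PySem.Str.split? lastBoat "-").getD []
  -- 'for i in tie_breaker: tie_breaker[tie_breaker.index(i)] = i[0:2]' (in-place, same length)
  let tb1 := (List.range tb0.length).foldl (fun l k =>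
      let i := l.getD k ""
      match PySem.List.index? l i with
      | some q => l.set q (PySem.Str.slice i (some 0) (some 2))
      | none => l) tb0
  let tie_breaker := PySem.List.slice tb1 (some 1) none
  if 0 < draw_reference.length then
    draw_reference.foldl (fun keys i =>
      let draw_team := sorted_score.items.foldl
          (fun acc kv => if kv.2 == i then acc ++ [kv.1] else acc) []
      let ref_index := pvFindRef keys draw_team keys
      let keys1 := draw_team.foldl (fun ks j => (PySem.List.remove? ks j).getD ks) keys
      let ref_list := tie_breaker.foldl
          (fun acc t => if draw_team.contains t then acc ++ [t] else acc) []
      (ref_list.foldl (fun (p : List String × Int) t => (PySem.List.insert p.1 p.2 t, p.2 + 1))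
        (keys1, ((ref_index.getD 0 : Nat) : Int))).1) keys0
  else keys0

-- ===== PORT B =====
-- one grouping step of B's single pass (the body of Source B's grouping for-loop)
def pvGroupStep (st : List (Int × List String) × PySem.Dict Int Nat) (kv : String × Int) :
    List (Int × List String) × PySem.Dict Int Nat :=
  match st.2.get? kv.2 with
  | none => (st.1 ++ [(kv.2, [kv.1])], st.2.insert kv.2 st.1.length)
  | some p => (st.1.modify p (fun g => (g.1, g.2 ++ [kv.1])), st.2)

def sorting_hat_alt (score_dict : List (String × Int)) (draw_reference : List Int) (boattype_sorted : List String) : List String :=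
  let tie_breaker := ((((PySem.Str.split? ((PySem.List.pyGet? boattype_sorted (-1)).getD "") "-").getD []).map
      (fun part => PySem.Str.slice part none (some 2))).drop 1)
  let draws : PySem.Set Int := PySem.Set.ofList draw_reference
  let st := (PySem.List.sorted score_dict (fun item => item.2)).foldl pvGroupStep ([], PySem.Dict.empty)
  st.1.foldl (fun acc g =>
      if draws.contains g.1 then
        acc ++ tie_breaker.filter (fun n => (PySem.Set.ofList g.2).contains n)
      else acc ++ g.2) []

-- ===== PRECONDITION & SPEC =====
-- Pre_ excludes: empty boattype_sorted, where A raises IndexError; duplicate entries in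
-- draw_reference, on which A re-processes an already reordered tie group and either raises
-- ValueError (list.remove) or accidentally accumulates duplicate tie-breaker insertions; and
-- score_dict lists with duplicate keys, which do not represent a Python dict.
def Pre_sorting_hat (score_dict : List (String × Int)) (draw_reference : List Int) (boattype_sorted : List String) : Prop :=
  boattype_sorted ≠ [] ∧ draw_reference.Nodup ∧ (score_dict.map Prod.fst).Nodup
instance (score_dict : List (String × Int)) (draw_reference : List Int) (boattype_sorted : List String) : Decidable (Pre_sorting_hat score_dict draw_reference boattype_sorted) := by unfold Pre_sorting_hat; infer_instance

def pvWitness_sorting_hat : (List (String × Int)) × List Int × List String :=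
  ([("aa", 1), ("bb", 1), ("cc", 0)], [1], ["8-bb-aa"])

def Spec_sorting_hat (score_dict : List (String × Int)) (draw_reference : List Int) (boattype_sorted : List String) (out : List String) : Prop := out = sorting_hat_alt score_dict draw_reference boattype_sorted
instance (score_dict : List (String × Int)) (draw_reference : List Int) (boattype_sorted : List String) (out : List String) : Decidable (Spec_sorting_hat score_dict draw_reference boattype_sorted out) := by unfold Spec_sorting_hat; infer_instance

-- ===== CLAIM (what is proved, stated in full; the proofs are below) =====
def Claim_equal_sorting_hat : Prop := ∀ (score_dict : List (String × Int)) (draw_reference : List Int) (boattype_sorted : List String), Dom_sorting_hat score_dict draw_reference boattype_sorted → Pre_sorting_hat score_dict draw_reference boattype_sorted → Spec_sorting_hat score_dict draw_reference boattype_sorted (sorting_hat score_dict draw_reference boattype_sorted)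

-- ===== LEMMAS AND PROOFS =====

-- abbreviations used only by the proofs
def pvP2 (s : String) : String := PySem.Str.slice s none (some 2)

def pvGrp (its : List (String × Int)) (s : Int) : List String :=
  (its.filter (fun kv => kv.2 == s)).map Prod.fst

def pvG (its : List (String × Int)) : List (Int × List String) :=
  (PySem.List.dedup (its.map Prod.snd)).map (fun s => (s, pvGrp its s))

def pvTF (tb : List String) (names : List String) : List String :=
  tb.filter (fun n => (PySem.Set.ofList names).contains n)

def pvK (tb : List String) (G : List (Int × List String)) (S : List Int) : List String :=
  G.flatMap (fun g => if g.1 ∈ S then pvTF tb g.2 else g.2)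

-- p2 is idempotent
theorem pvP2_idem (s : String) : pvP2 (pvP2 s) = pvP2 s := by
  simp [pvP2, PySem.Str.slice, PySem.List.slice, List.take_take]

theorem pv_add_cons {α : Type} [BEq α] [LawfulBEq α] (xs : List α) (x : α) (hx : x ∉ xs) :
    ∀ (s : List α), List.foldl PySem.Set.add (x :: s) xs = x :: List.foldl PySem.Set.add s xs := by
  induction xs with
  | nil => intro s; rfl
  | cons y ys ih =>
      intro s
      have hyx : y ≠ x := fun h => hx (by rw [← h]; exact List.mem_cons_self)
      have hx' : x ∉ ys := fun h => hx (List.mem_cons_of_mem _ h)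
      have hstep : PySem.Set.add (x :: s) y = x :: PySem.Set.add s y := by
        by_cases h : y ∈ s <;> simp [PySem.Set.add, PySem.Set.contains, h, hyx]
      simp only [List.foldl_cons, hstep, ih hx']

theorem pv_add_replicate {α : Type} [BEq α] [LawfulBEq α] (x : α) :
    ∀ (n : Nat), List.foldl PySem.Set.add [x] (List.replicate n x) = [x] := by
  intro n
  induction n with
  | zero => rfl
  | succ m ih =>
      have : PySem.Set.add [x] x = [x] := by
        simp [PySem.Set.add, PySem.Set.contains]
      simp only [List.replicate_succ, List.foldl_cons, this, ih]

theorem pv_dedup_block {α : Type} [BEq α] [LawfulBEq α] (x : α) (n : Nat) (rest : List α)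
    (hx : x ∉ rest) :
    PySem.List.dedup (List.replicate (n + 1) x ++ rest) = x :: PySem.List.dedup rest := by
  have h1 : List.foldl PySem.Set.add [] (List.replicate (n+1) x) = [x] := by
    simp only [List.replicate_succ, List.foldl_cons]
    have : PySem.Set.add [] x = [x] := by simp [PySem.Set.add, PySem.Set.contains]
    rw [this, pv_add_replicate]
  calc PySem.List.dedup (List.replicate (n + 1) x ++ rest)
      = PySem.Set.ofList (List.replicate (n + 1) x ++ rest) := by simp
    _ = List.foldl PySem.Set.add [] (List.replicate (n + 1) x ++ rest) := PySem.Set.ofList_eq_foldl _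
    _ = List.foldl PySem.Set.add [x] rest := by rw [List.foldl_append, h1]
    _ = x :: List.foldl PySem.Set.add [] rest := pv_add_cons rest x hx []
    _ = x :: PySem.Set.ofList rest := by rw [PySem.Set.ofList_eq_foldl]
    _ = x :: PySem.List.dedup rest := by simp

theorem pv_flatMap_congr {α β : Type} (l : List α) (f g : α → List β)
    (h : ∀ x ∈ l, f x = g x) : l.flatMap f = l.flatMap g := by
  induction l with
  | nil => rfl
  | cons a t ih =>
      simp only [List.flatMap_cons, h a List.mem_cons_self,
        ih (fun x hx => h x (List.mem_cons_of_mem _ hx))]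

theorem pv_dropWhileHead {α : Type} (p : α → Bool) :
    ∀ (t : List α) (b : α) (r : List α), t.dropWhile p = b :: r → p b = false := by
  intro t
  induction t with
  | nil => intro b r h; simp at h
  | cons x xs ih =>
      intro b r h
      by_cases hx : p x = true
      · rw [List.dropWhile_cons_of_pos hx] at h; exact ih b r h
      · rw [List.dropWhile_cons_of_neg hx] at h
        injection h with h1 h2
        subst h1
        simpa using hx

theorem pv_grouped' (l : List (String × Int))
    (hp : l.Pairwise (fun a b => a.2 ≤ b.2)) :
    (PySem.List.dedup (l.map Prod.snd)).flatMap (fun s => l.filter (fun kv => kv.2 == s)) = l := by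
  induction hn : l.length using Nat.strong_induction_on generalizing l with
  | _ n ih =>
    cases l with
    | nil => simp
    | cons a t =>
      rcases List.pairwise_cons.1 hp with ⟨ha, hpt⟩
      have hl1eq : (a :: t).takeWhile (fun kv => kv.2 == a.2)
          = a :: t.takeWhile (fun kv => kv.2 == a.2) := List.takeWhile_cons_of_pos (by simp)
      have hl2eq : (a :: t).dropWhile (fun kv => kv.2 == a.2)
          = t.dropWhile (fun kv => kv.2 == a.2) := List.dropWhile_cons_of_pos (by simp)
      have hsplit : (a :: t).takeWhile (fun kv => kv.2 == a.2)
          ++ (a :: t).dropWhile (fun kv => kv.2 == a.2) = a :: t := List.takeWhile_append_dropWhile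
      rw [hl1eq, hl2eq] at hsplit
      have hsub2 : (t.dropWhile (fun kv => kv.2 == a.2)).Sublist t := List.dropWhile_sublist _
      have hp2 : (t.dropWhile (fun kv => kv.2 == a.2)).Pairwise (fun a b => a.2 ≤ b.2) :=
        hpt.sublist hsub2
      have h11 : ∀ kv ∈ a :: t.takeWhile (fun kv => kv.2 == a.2), kv.2 = a.2 := by
        intro kv hkv
        rcases List.mem_cons.1 hkv with h | h
        · rw [h]
        · simpa using List.mem_takeWhile_imp h
      have h2 : ∀ kv ∈ t.dropWhile (fun kv => kv.2 == a.2), kv.2 ≠ a.2 := by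
        intro kv hkv
        cases hl2 : t.dropWhile (fun kv => kv.2 == a.2) with
        | nil => rw [hl2] at hkv; simp at hkv
        | cons b r =>
            rw [hl2] at hkv
            have hb : ¬ b.2 = a.2 := by
              simpa using pv_dropWhileHead _ t b r hl2
            have hble : a.2 ≤ b.2 := ha b (hsub2.subset (by rw [hl2]; exact List.mem_cons_self))
            have hblt : a.2 < b.2 := lt_of_le_of_ne hble (fun h => hb h.symm)
            have hp2' : (b :: r).Pairwise (fun a b => a.2 ≤ b.2) := by rwa [hl2] at hp2
            rcases List.mem_cons.1 hkv with h | h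
            · rw [h]; omega
            · have := List.rel_of_pairwise_cons hp2' h; omega
      -- the score list splits into a nonempty constant block and a rest avoiding a.2
      have hmapsplit : (a :: t).map Prod.snd
          = List.replicate ((t.takeWhile (fun kv => kv.2 == a.2)).length + 1) a.2
            ++ (t.dropWhile (fun kv => kv.2 == a.2)).map Prod.snd := by
        have h1 : (a :: t.takeWhile (fun kv => kv.2 == a.2)).map Prod.snd
            = List.replicate ((t.takeWhile (fun kv => kv.2 == a.2)).length + 1) a.2 := by
          have := List.eq_replicate_of_mem (a := a.2)
            (l := (a :: t.takeWhile (fun kv => kv.2 == a.2)).map Prod.snd) ?_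
          · simpa using this
          · intro b hb
            rcases List.mem_map.1 hb with ⟨kv, hkv, hkv2⟩
            rw [← hkv2]; exact h11 kv hkv
        calc (a :: t).map Prod.snd
            = ((a :: t.takeWhile (fun kv => kv.2 == a.2))
                ++ t.dropWhile (fun kv => kv.2 == a.2)).map Prod.snd := by rw [hsplit]
          _ = _ := by rw [List.map_append, h1]
      have hxnot : a.2 ∉ (t.dropWhile (fun kv => kv.2 == a.2)).map Prod.snd := by
        intro hmem
        rcases List.mem_map.1 hmem with ⟨kv, hkv, hkv2⟩
        exact h2 kv hkv hkv2
      have hded : PySem.List.dedup ((a :: t).map Prod.snd)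
          = a.2 :: PySem.List.dedup ((t.dropWhile (fun kv => kv.2 == a.2)).map Prod.snd) := by
        rw [hmapsplit]; exact pv_dedup_block _ _ _ hxnot
      rw [hded, List.flatMap_cons]
      have hfa : (a :: t).filter (fun kv => kv.2 == a.2)
          = a :: t.takeWhile (fun kv => kv.2 == a.2) := by
        rw [← hsplit, List.filter_append]
        have hf1 : (a :: t.takeWhile (fun kv => kv.2 == a.2)).filter (fun kv => kv.2 == a.2)
            = a :: t.takeWhile (fun kv => kv.2 == a.2) :=
          List.filter_eq_self.2 (fun kv hkv => by simpa using h11 kv hkv)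
        have hf2 : (t.dropWhile (fun kv => kv.2 == a.2)).filter (fun kv => kv.2 == a.2) = [] :=
          List.filter_eq_nil_iff.2 (fun kv hkv => by simpa using h2 kv hkv)
        rw [hf1, hf2, List.append_nil]
      have htail : (PySem.List.dedup ((t.dropWhile (fun kv => kv.2 == a.2)).map Prod.snd)).flatMap
            (fun s => (a :: t).filter (fun kv => kv.2 == s))
          = t.dropWhile (fun kv => kv.2 == a.2) := by
        have hcongr : ∀ s ∈ PySem.List.dedup ((t.dropWhile (fun kv => kv.2 == a.2)).map Prod.snd),
            (a :: t).filter (fun kv => kv.2 == s)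
              = (t.dropWhile (fun kv => kv.2 == a.2)).filter (fun kv => kv.2 == s) := by
          intro s hs
          have hs' : s ∈ (t.dropWhile (fun kv => kv.2 == a.2)).map Prod.snd := by
            rwa [PySem.List.mem_dedup] at hs
          rcases List.mem_map.1 hs' with ⟨kv0, hkv0, hkv02⟩
          have hsne : s ≠ a.2 := by rw [← hkv02]; exact h2 kv0 hkv0
          rw [← hsplit, List.filter_append]
          have hf1 : (a :: t.takeWhile (fun kv => kv.2 == a.2)).filter (fun kv => kv.2 == s)
              = [] := List.filter_eq_nil_iff.2 (fun kv hkv => by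
                have hkv2 := h11 kv hkv
                simp only [hkv2, beq_iff_eq]
                exact fun h => hsne h.symm)
          rw [hf1, List.nil_append]
        rw [pv_flatMap_congr _ _ _ hcongr]
        have hlen : (t.dropWhile (fun kv => kv.2 == a.2)).length < n := by
          have := hsub2.length_le
          simp only [← hn, List.length_cons]
          omega
        exact ih _ hlen _ hp2 rfl
      rw [hfa, htail]
      exact hsplit

theorem pv_grp_append_ne (its : List (String × Int)) (kv : String × Int) (s : Int)
    (h : kv.2 ≠ s) : pvGrp (its ++ [kv]) s = pvGrp its s := by
  have : (kv.2 == s) = false := by simpa using h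
  simp [pvGrp, List.filter_append, this]

theorem pv_grp_append_self (its : List (String × Int)) (kv : String × Int) :
    pvGrp (its ++ [kv]) kv.2 = pvGrp its kv.2 ++ [kv.1] := by
  simp [pvGrp, List.filter_append]

theorem pv_grp_nil_of_not_mem (its : List (String × Int)) (s : Int)
    (h : s ∉ its.map Prod.snd) : pvGrp its s = [] := by
  have : its.filter (fun kv => kv.2 == s) = [] := by
    apply List.filter_eq_nil_iff.2
    intro kv hkv
    simp only [beq_iff_eq]
    intro he
    exact h (List.mem_map.2 ⟨kv, hkv, he⟩)
  simp [pvGrp, this]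

theorem pv_dedup_append (its : List (String × Int)) (kv : String × Int) :
    PySem.List.dedup ((its ++ [kv]).map Prod.snd)
      = PySem.Set.add (PySem.List.dedup (its.map Prod.snd)) kv.2 := by
  have h1 : PySem.List.dedup ((its ++ [kv]).map Prod.snd)
      = PySem.Set.ofList (its.map Prod.snd ++ [kv.2]) := by simp
  rw [h1, PySem.Set.ofList_eq_foldl, List.foldl_append]
  simp only [List.foldl_cons, List.foldl_nil]
  rw [← PySem.Set.ofList_eq_foldl]
  simp

theorem pv_bfold_aux (its : List (String × Int)) :
    (its.foldl pvGroupStep ([], PySem.Dict.empty)).1 = pvG its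
    ∧ ∀ s : Int, (its.foldl pvGroupStep ([], PySem.Dict.empty)).2.get? s
        = (PySem.List.index? (PySem.List.dedup (its.map Prod.snd)) s) := by
  induction its using List.reverseRecOn with
  | nil =>
      constructor
      · rfl
      · intro s
        simp [PySem.Dict.get?_empty]
  | append_singleton its kv ih =>
      rcases ih with ⟨ih1, ih2⟩
      have hnods : (PySem.List.dedup (its.map Prod.snd)).Nodup := PySem.List.nodup_dedup _
      by_cases hc : kv.2 ∈ PySem.List.dedup (its.map Prod.snd)
      · -- existing score: modify branch
        have hcm : kv.2 ∈ its.map Prod.snd := by rwa [PySem.List.mem_dedup] at hc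
        have hsome : ∃ p, PySem.List.index? (PySem.List.dedup (its.map Prod.snd)) kv.2 = some p := by
          have := (PySem.List.index?_isSome_iff (PySem.List.dedup (its.map Prod.snd)) kv.2).2 hc
          exact Option.isSome_iff_exists.1 this
        rcases hsome with ⟨p, hp⟩
        have hget : (its.foldl pvGroupStep ([], PySem.Dict.empty)).2.get? kv.2 = some p := by
          rw [ih2, hp]
        have hstep : (its ++ [kv]).foldl pvGroupStep ([], PySem.Dict.empty)
            = ((its.foldl pvGroupStep ([], PySem.Dict.empty)).1.modify p (fun g => (g.1, g.2 ++ [kv.1])),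
               (its.foldl pvGroupStep ([], PySem.Dict.empty)).2) := by
          rw [List.foldl_append]
          simp only [List.foldl_cons, List.foldl_nil, pvGroupStep, hget]
        have hct : (PySem.List.dedup (its.map Prod.snd)).contains kv.2 = true :=
          List.contains_iff_mem.2 hc
        have hded : PySem.List.dedup ((its ++ [kv]).map Prod.snd)
            = PySem.List.dedup (its.map Prod.snd) := by
          rw [pv_dedup_append]
          simp only [PySem.Set.add, PySem.Set.contains, hct, if_true]
        rcases PySem.List.getElem_of_index?_eq_some hp with ⟨hplen, hdsp, _⟩
        constructor
        · rw [hstep]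
          simp only [ih1]
          simp only [pvG]
          rw [hded]
          apply List.ext_getElem
          · simp
          · intro j h1 h2
            have hjlen : j < (PySem.List.dedup (its.map Prod.snd)).length := by
              simpa [pvG] using h2
            rw [List.getElem_modify]
            by_cases hpj : p = j
            · subst hpj
              rw [if_pos rfl]
              simp only [List.getElem_map, hdsp]
              rw [pv_grp_append_self]
            · have hne : (PySem.List.dedup (its.map Prod.snd))[j] ≠ kv.2 := by
                rw [← hdsp]
                intro h
                exact hpj ((List.Nodup.getElem_inj_iff hnods).1 h.symm)
              simp only [List.getElem_map]
              rw [pv_grp_append_ne _ _ _ (fun h => hne h.symm), if_neg hpj]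
        · intro s
          rw [hstep]
          simp only
          rw [ih2, hded]
      · -- new score: append branch
        have hcm : kv.2 ∉ its.map Prod.snd := fun h => hc ((PySem.List.mem_dedup _ _).2 h)
        have hcf : (PySem.List.dedup (its.map Prod.snd)).contains kv.2 = false := by
          cases h : (PySem.List.dedup (its.map Prod.snd)).contains kv.2 with
          | false => rfl
          | true => exact absurd (List.contains_iff_mem.1 h) hc
        have hget : (its.foldl pvGroupStep ([], PySem.Dict.empty)).2.get? kv.2 = none := by
          rw [ih2]
          exact (PySem.List.index?_eq_none_iff _ _).2 hc
        have hstep : (its ++ [kv]).foldl pvGroupStep ([], PySem.Dict.empty)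
            = ((its.foldl pvGroupStep ([], PySem.Dict.empty)).1 ++ [(kv.2, [kv.1])],
               (its.foldl pvGroupStep ([], PySem.Dict.empty)).2.insert kv.2
                 (its.foldl pvGroupStep ([], PySem.Dict.empty)).1.length) := by
          rw [List.foldl_append]
          simp only [List.foldl_cons, List.foldl_nil, pvGroupStep, hget]
        have hded : PySem.List.dedup ((its ++ [kv]).map Prod.snd)
            = PySem.List.dedup (its.map Prod.snd) ++ [kv.2] := by
          rw [pv_dedup_append]
          simp only [PySem.Set.add, PySem.Set.contains, hcf, Bool.false_eq_true, if_false]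
        have hlen1 : (its.foldl pvGroupStep ([], PySem.Dict.empty)).1.length
            = (PySem.List.dedup (its.map Prod.snd)).length := by
          rw [ih1]; simp [pvG]
        constructor
        · rw [hstep]
          simp only [ih1]
          simp only [pvG]
          rw [hded, List.map_append]
          congr 1
          · apply List.map_congr_left
            intro s hs
            have hsne : kv.2 ≠ s := fun h => hc (h ▸ hs)
            rw [pv_grp_append_ne _ _ _ hsne]
          · simp only [List.map_cons, List.map_nil]
            rw [pv_grp_append_self, pv_grp_nil_of_not_mem _ _ hcm]
            rfl
        · intro s
          rw [hstep]
          simp only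
          rw [PySem.Dict.get?_insert]
          by_cases hs : s = kv.2
          · subst hs
            rw [if_pos rfl, hded, hlen1]
            rw [PySem.List.index?_append_singleton_self _ _ hc]
          · rw [if_neg hs, ih2, hded]
            by_cases hsm : s ∈ PySem.List.dedup (its.map Prod.snd)
            · rw [PySem.List.index?_append_of_mem _ hsm]
            · rw [(PySem.List.index?_eq_none_iff _ _).2 hsm]
              rw [(PySem.List.index?_eq_none_iff _ _).2 ?_]
              intro h
              rcases List.mem_append.1 h with h1 | h1
              · exact hsm h1
              · exact hs (List.mem_singleton.1 h1)

def pvStep (its : List (String × Int)) (tb : List String) (keys : List String) (i : Int) : List String :=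
  let draw_team := its.foldl (fun acc kv => if kv.2 == i then acc ++ [kv.1] else acc) []
  let ref_index := pvFindRef keys draw_team keys
  let keys1 := draw_team.foldl (fun ks j => (PySem.List.remove? ks j).getD ks) keys
  let ref_list := tb.foldl (fun acc t => if draw_team.contains t then acc ++ [t] else acc) []
  (ref_list.foldl (fun (p : List String × Int) t => (PySem.List.insert p.1 p.2 t, p.2 + 1))
    (keys1, ((ref_index.getD 0 : Nat) : Int))).1

theorem pv_findRef_nil (keys : List String) :
    ∀ rest : List String, pvFindRef keys [] rest = none := by
  intro rest
  induction rest with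
  | nil => rfl
  | cons j r ih => simp [pvFindRef, ih]

theorem pv_findRef_skip (keys dt : List String) :
    ∀ (P rest : List String), (∀ x ∈ P, x ∉ dt) →
      pvFindRef keys dt (P ++ rest) = pvFindRef keys dt rest := by
  intro P
  induction P with
  | nil => intro rest _; rfl
  | cons x xs ih =>
      intro rest hP
      have hx : dt.contains x = false := by
        have := hP x List.mem_cons_self
        simp [this]
      simp only [List.cons_append, pvFindRef, hx, Bool.false_eq_true, if_false]
      exact ih rest (fun y hy => hP y (List.mem_cons_of_mem _ hy))

theorem pv_findRef_found (P : List String) (b : String) (rest dt : List String)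
    (hP : ∀ x ∈ P, x ∉ dt) (hbd : b ∈ dt) (hbP : b ∉ P) :
    pvFindRef (P ++ b :: rest) dt (P ++ b :: rest) = some P.length := by
  rw [pv_findRef_skip (P ++ b :: rest) dt P (b :: rest) hP]
  have hcb : dt.contains b = true := List.contains_iff_mem.2 hbd
  have hred : pvFindRef (P ++ b :: rest) dt (b :: rest) = PySem.List.index? (P ++ b :: rest) b := by
    show (if dt.contains b then PySem.List.index? (P ++ b :: rest) b
          else pvFindRef (P ++ b :: rest) dt rest) = _
    rw [hcb]
    rfl
  rw [hred]
  exact (PySem.List.index?_eq_some_iff _ _ _).2 ⟨P, rest, rfl, rfl, hbP⟩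

theorem pv_removeAll : ∀ (block : List String), block.Nodup →
    ∀ (P Q : List String), (∀ x ∈ block, x ∉ P) →
    block.foldl (fun ks j => (PySem.List.remove? ks j).getD ks) (P ++ (block ++ Q)) = P ++ Q := by
  intro block
  induction block with
  | nil => intro _ P Q _; simp
  | cons b bs ih =>
      intro hnd P Q hP
      rcases List.nodup_cons.1 hnd with ⟨hbn, hnd'⟩
      have hbmem : b ∈ P ++ (b :: bs ++ Q) := by simp
      have hrem : PySem.List.remove? (P ++ (b :: bs ++ Q)) b = some (P ++ (bs ++ Q)) := by
        rw [PySem.List.remove?_eq_some_erase _ _ hbmem]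
        congr 1
        rw [List.erase_append_right _ (hP b List.mem_cons_self)]
        simp
      simp only [List.foldl_cons, hrem, Option.getD_some]
      exact ih hnd' P Q (fun x hx => hP x (List.mem_cons_of_mem _ hx))

theorem pv_insertAll : ∀ (rl P Q : List String),
    (rl.foldl (fun (p : List String × Int) t => (PySem.List.insert p.1 p.2 t, p.2 + 1))
      (P ++ Q, (P.length : Int))).1 = P ++ (rl ++ Q) := by
  intro rl
  induction rl with
  | nil => intro P Q; simp
  | cons t ts ih =>
      intro P Q
      have hins : PySem.List.insert (P ++ Q) (P.length : Int) t = (P ++ [t]) ++ Q := by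
        rw [PySem.List.insert_natCast _ _ _ (by simp)]
        simp
      have hlen : (P.length : Int) + 1 = (((P ++ [t]).length : Nat) : Int) := by
        simp
      simp only [List.foldl_cons, hins, hlen]
      rw [ih (P ++ [t]) Q]
      simp

theorem pv_contains_ofList {α : Type} [BEq α] [LawfulBEq α] (l : List α) (x : α) :
    (PySem.Set.ofList l).contains x = l.contains x := by
  by_cases h : x ∈ l <;>
    simp [PySem.Set.contains, PySem.Set.mem_ofList, h]

theorem pv_reflist (tb dt : List String) :
    tb.foldl (fun acc t => if dt.contains t then acc ++ [t] else acc) [] = pvTF tb dt := by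
  rw [PySem.List.foldl_append_if_eq_filter]
  rw [pvTF]
  rw [List.nil_append]
  apply List.filter_congr
  intro x _
  rw [pv_contains_ofList]

theorem pv_grp_unique (its : List (String × Int)) (hnd : (its.map Prod.fst).Nodup)
    (x : String) (s s' : Int) (h1 : x ∈ pvGrp its s) (h2 : x ∈ pvGrp its s') : s = s' := by
  rcases List.mem_map.1 h1 with ⟨kv, hkvf, hkvx⟩
  rcases List.mem_map.1 h2 with ⟨kv', hkvf', hkvx'⟩
  rcases List.mem_filter.1 hkvf with ⟨hkvm, hkvs⟩
  rcases List.mem_filter.1 hkvf' with ⟨hkvm', hkvs'⟩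
  have hkk : kv = kv' :=
    List.inj_on_of_nodup_map hnd hkvm hkvm' (hkvx.trans hkvx'.symm)
  have h1' : kv.2 = s := by simpa using hkvs
  have h2' : kv'.2 = s' := by simpa using hkvs'
  rw [← h1', hkk, h2']

theorem pv_mem_body (tb : List String) (names : List String) (x : String) (c : Prop)
    [Decidable c] (h : x ∈ (if c then pvTF tb names else names)) : x ∈ names := by
  by_cases hc : c
  · rw [if_pos hc] at h
    rcases List.mem_filter.1 h with ⟨_, hx⟩
    rw [pv_contains_ofList] at hx
    exact List.contains_iff_mem.1 hx
  · rwa [if_neg hc] at h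

theorem pv_grp_nodup (its : List (String × Int)) (hnd : (its.map Prod.fst).Nodup) (s : Int) :
    (pvGrp its s).Nodup :=
  hnd.sublist (List.Sublist.map Prod.fst List.filter_sublist)

theorem pv_stepA (its : List (String × Int)) (tb : List String)
    (hnd : (its.map Prod.fst).Nodup) (S : List Int) (i : Int) (hiS : i ∉ S) :
    pvStep its tb (pvK tb (pvG its) S) i = pvK tb (pvG its) (S ++ [i]) := by
  have hdt : its.foldl (fun acc kv => if kv.2 == i then acc ++ [kv.1] else acc) []
      = pvGrp its i := by
    rw [PySem.List.foldl_append_if]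
    rw [List.nil_append]
    rfl
  simp only [pvStep, hdt]
  by_cases hmem : i ∈ its.map Prod.snd
  · -- i is the score of a (nonempty) group
    have hiid : i ∈ PySem.List.dedup (its.map Prod.snd) := (PySem.List.mem_dedup _ _).2 hmem
    have hsome := (PySem.List.index?_isSome_iff (PySem.List.dedup (its.map Prod.snd)) i).2 hiid
    rcases Option.isSome_iff_exists.1 hsome with ⟨k, hk⟩
    rcases (PySem.List.index?_eq_some_iff _ _ _).1 hk with ⟨pre, suf, hds, hklen, hpre⟩
    have hnds : (PySem.List.dedup (its.map Prod.snd)).Nodup := PySem.List.nodup_dedup _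
    have hisuf : i ∉ suf := by
      rw [hds] at hnds
      exact (List.nodup_cons.1 (List.Nodup.of_append_right hnds)).1
    have hnamesne : pvGrp its i ≠ [] := by
      rcases List.mem_map.1 hmem with ⟨kv, hkv, hkvi⟩
      have : kv.1 ∈ pvGrp its i :=
        List.mem_map.2 ⟨kv, List.mem_filter.2 ⟨hkv, by simp [hkvi]⟩, rfl⟩
      exact List.ne_nil_of_mem this
    have hGsplit : pvG its
        = pre.map (fun s => (s, pvGrp its s))
          ++ ((i, pvGrp its i) :: suf.map (fun s => (s, pvGrp its s))) := by
      rw [pvG, hds, List.map_append, List.map_cons]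
    set A' := (pre.map (fun s => (s, pvGrp its s))).flatMap
        (fun g => if g.1 ∈ S then pvTF tb g.2 else g.2) with hA'def
    set B' := (suf.map (fun s => (s, pvGrp its s))).flatMap
        (fun g => if g.1 ∈ S then pvTF tb g.2 else g.2) with hB'def
    have hKsplit : ∀ S' : List Int, pvK tb (pvG its) S'
        = (pre.map (fun s => (s, pvGrp its s))).flatMap
            (fun g => if g.1 ∈ S' then pvTF tb g.2 else g.2)
          ++ ((if i ∈ S' then pvTF tb (pvGrp its i) else pvGrp its i)
          ++ (suf.map (fun s => (s, pvGrp its s))).flatMap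
            (fun g => if g.1 ∈ S' then pvTF tb g.2 else g.2)) := by
      intro S'
      simp [pvK, hGsplit, List.flatMap_append, List.flatMap_cons]
    have hflank : ∀ (l : List Int) (S' : List Int), i ∉ l →
        ∀ x ∈ (l.map (fun s => (s, pvGrp its s))).flatMap
          (fun g => if g.1 ∈ S' then pvTF tb g.2 else g.2), x ∉ pvGrp its i := by
      intro l S' hil x hx
      rcases List.mem_flatMap.1 hx with ⟨g, hg, hxg⟩
      rcases List.mem_map.1 hg with ⟨s, hs, rfl⟩
      have hxs : x ∈ pvGrp its s := pv_mem_body tb _ x _ hxg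
      intro hxi
      exact hil (pv_grp_unique its hnd x s i hxs hxi ▸ hs)
    have hflankS : ∀ (l : List Int) (S₁ S₂ : List Int), i ∉ l →
        (∀ j, j ≠ i → (j ∈ S₁ ↔ j ∈ S₂)) →
        (l.map (fun s => (s, pvGrp its s))).flatMap
          (fun g => if g.1 ∈ S₁ then pvTF tb g.2 else g.2)
        = (l.map (fun s => (s, pvGrp its s))).flatMap
          (fun g => if g.1 ∈ S₂ then pvTF tb g.2 else g.2) := by
      intro l S₁ S₂ hil hiff
      apply pv_flatMap_congr
      intro g hg
      rcases List.mem_map.1 hg with ⟨s, hs, rfl⟩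
      have hsne : s ≠ i := fun h => hil (h ▸ hs)
      exact if_congr (hiff s hsne) rfl rfl
    have hA' : ∀ x ∈ A', x ∉ pvGrp its i := hflank pre S hpre
    have hB' : ∀ x ∈ B', x ∉ pvGrp its i := hflank suf S hisuf
    cases hnames : pvGrp its i with
    | nil => exact absurd hnames hnamesne
    | cons n0 nrest =>
      have hKS : pvK tb (pvG its) S = A' ++ ((n0 :: nrest) ++ B') := by
        rw [hKsplit S, if_neg hiS, hnames, ← hA'def, ← hB'def]
      have hPn : ∀ x ∈ A', x ∉ (n0 :: nrest) := by
        intro x hx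
        rw [← hnames]
        exact hA' x hx
      have hn0A : n0 ∉ A' := fun hn0 => (hPn n0 hn0) List.mem_cons_self
      have hBn : ∀ x ∈ (n0 :: nrest), x ∉ A' := fun x hx hxa => hPn x hxa hx
      rw [hKS]
      have hassoc : A' ++ ((n0 :: nrest) ++ B') = A' ++ (n0 :: (nrest ++ B')) := by simp
      rw [hassoc]
      rw [pv_findRef_found A' n0 (nrest ++ B') (n0 :: nrest) hPn List.mem_cons_self hn0A]
      rw [show A' ++ (n0 :: (nrest ++ B')) = A' ++ ((n0 :: nrest) ++ B') from by simp]
      rw [pv_removeAll (n0 :: nrest) (by rw [← hnames]; exact pv_grp_nodup its hnd i)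
        A' B' hBn]
      rw [pv_reflist tb (n0 :: nrest), Option.getD_some]
      rw [pv_insertAll]
      rw [hKsplit (S ++ [i]), if_pos (by simp)]
      rw [hflankS pre (S ++ [i]) S hpre (by intro j hj; simp [hj]),
          hflankS suf (S ++ [i]) S hisuf (by intro j hj; simp [hj]), hnames,
          ← hA'def, ← hB'def]
  · -- no team has score i: the step is a no-op
    have hg : pvGrp its i = [] := pv_grp_nil_of_not_mem _ _ hmem
    rw [hg]
    rw [pv_findRef_nil]
    simp only [List.foldl_nil]
    have hrl : tb.foldl (fun acc t => if List.contains ([] : List String) t then acc ++ [t] else acc) []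
        = ([] : List String) := by
      rw [PySem.List.foldl_append_if_eq_filter]
      simp
    rw [hrl]
    simp only [List.foldl_nil]
    show pvK tb (pvG its) S = pvK tb (pvG its) (S ++ [i])
    simp only [pvK]
    apply pv_flatMap_congr
    intro g hg'
    rcases List.mem_map.1 hg' with ⟨s, hs, rfl⟩
    have hsne : s ≠ i := by
      intro h
      exact hmem (h ▸ (PySem.List.mem_dedup _ _).1 hs)
    exact if_congr (by simp [hsne]) rfl rfl

theorem pv_loop (its : List (String × Int)) (tb : List String)
    (hnd : (its.map Prod.fst).Nodup) :
    ∀ (rest S : List Int), rest.Nodup → (∀ j ∈ rest, j ∉ S) →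
      rest.foldl (pvStep its tb) (pvK tb (pvG its) S) = pvK tb (pvG its) (S ++ rest) := by
  intro rest
  induction rest with
  | nil => intro S _ _; simp
  | cons i irest ih =>
      intro S hnd' hdisj
      rcases List.nodup_cons.1 hnd' with ⟨hii, hnd''⟩
      rw [List.foldl_cons, pv_stepA its tb hnd S i (hdisj i List.mem_cons_self)]
      rw [ih (S ++ [i]) hnd'' ?_]
      · rw [List.append_assoc]
        rfl
      · intro j hj hmem
        rcases List.mem_append.1 hmem with h1 | h1
        · exact hdisj j (List.mem_cons_of_mem _ hj) h1
        · exact hii ((List.mem_singleton.1 h1) ▸ hj)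

theorem pv_set_mid {α : Type} : ∀ (P : List α) (x v : α) (R : List α),
    (P ++ x :: R).set P.length v = P ++ v :: R := by
  intro P
  induction P with
  | nil => intro x v R; rfl
  | cons a t ih => intro x v R; simp only [List.cons_append, List.length_cons, List.set_cons_succ, ih]

theorem pv_p2A (s : String) : PySem.Str.slice s (some 0) (some 2) = pvP2 s := by
  simp [pvP2, PySem.Str.slice]

theorem pv_tbloop_aux (tb0 : List String) : ∀ j, j ≤ tb0.length →
    (List.range j).foldl (fun l k =>
      let i := l.getD k ""
      match PySem.List.index? l i with
      | some q => l.set q (PySem.Str.slice i (some 0) (some 2))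
      | none => l) tb0 = (tb0.take j).map pvP2 ++ tb0.drop j := by
  intro j
  induction j with
  | zero => intro _; simp
  | succ m ih =>
      intro hm1
      have hm : m < tb0.length := hm1
      rw [List.range_succ, List.foldl_append, ih (le_of_lt hm), List.foldl_cons, List.foldl_nil]
      have hpreflen : ((tb0.take m).map pvP2).length = m := by
        simp [List.length_take, Nat.min_eq_left (le_of_lt hm)]
      have hdropm : tb0.drop m = tb0[m] :: tb0.drop (m + 1) := List.drop_eq_getElem_cons hm
      have hget : ((tb0.take m).map pvP2 ++ tb0.drop m).getD m "" = tb0[m] := by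
        rw [List.getD_eq_getElem?_getD, List.getElem?_append_right (le_of_eq hpreflen)]
        rw [hpreflen, Nat.sub_self, hdropm]
        rfl
      have htake : (tb0.take (m+1)).map pvP2 = (tb0.take m).map pvP2 ++ [pvP2 tb0[m]] := by
        rw [List.take_add_one, List.getElem?_eq_getElem hm, List.map_append]
        rfl
      simp only [hget]
      by_cases hmem : tb0[m] ∈ (tb0.take m).map pvP2
      · have hidx : PySem.List.index? ((tb0.take m).map pvP2 ++ tb0.drop m) tb0[m]
            = PySem.List.index? ((tb0.take m).map pvP2) tb0[m] :=
          PySem.List.index?_append_of_mem _ hmem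
        have hsome := (PySem.List.index?_isSome_iff ((tb0.take m).map pvP2) tb0[m]).2 hmem
        rcases Option.isSome_iff_exists.1 hsome with ⟨q, hq⟩
        rcases PySem.List.getElem_of_index?_eq_some hq with ⟨hqlen, hqval, _⟩
        have hfix : pvP2 tb0[m] = tb0[m] := by
          have hx : tb0[m] = pvP2 ((tb0.take m)[q]'(by simpa using hqlen)) := by
            rw [← hqval]
            simp
          rw [hx, pvP2_idem]
        have hLq : ((tb0.take m).map pvP2 ++ tb0.drop m)[q]'(by
              rw [List.length_append]; omega) = tb0[m] := by
          rw [List.getElem_append_left hqlen]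
          exact hqval
        rw [hidx, hq]
        simp only [pv_p2A, hfix]
        have hsetid : ((tb0.take m).map pvP2 ++ tb0.drop m).set q tb0[m]
            = (tb0.take m).map pvP2 ++ tb0.drop m := by
          apply List.ext_getElem (by simp)
          intro idx h1 h2
          rw [List.getElem_set]
          by_cases hiq : q = idx
          · subst hiq
            rw [if_pos rfl, ← hLq]
          · rw [if_neg hiq]
        rw [hsetid, htake, hfix, hdropm]
        simp
      · have hL : (tb0.take m).map pvP2 ++ tb0.drop m
            = (tb0.take m).map pvP2 ++ tb0[m] :: tb0.drop (m+1) := by rw [← hdropm]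
        have hidx : PySem.List.index? ((tb0.take m).map pvP2 ++ tb0.drop m) tb0[m]
            = some ((tb0.take m).map pvP2).length :=
          (PySem.List.index?_eq_some_iff _ _ _).2 ⟨_, _, hL, rfl, hmem⟩
        rw [hidx]
        simp only [pv_p2A]
        rw [hL, pv_set_mid, htake]
        simp

theorem pv_tbloop (tb0 : List String) :
    (List.range tb0.length).foldl (fun l k =>
      match PySem.List.index? l (l.getD k "") with
      | some q => l.set q (PySem.Str.slice (l.getD k "") (some 0) (some 2))
      | none => l) tb0
    = tb0.map (fun part => PySem.Str.slice part none (some 2)) := by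
  have h := pv_tbloop_aux tb0 tb0.length le_rfl
  rw [List.take_length, List.drop_length, List.append_nil] at h
  rw [h]
  exact List.map_congr_left (fun x _ => rfl)

theorem pv_bfold (its : List (String × Int)) :
    (its.foldl pvGroupStep ([], PySem.Dict.empty)).1 = pvG its :=
  (pv_bfold_aux its).1

theorem pv_bfinal (tb : List String) (dr : List Int) (G : List (Int × List String)) :
    G.foldl (fun acc g => if (PySem.Set.ofList dr).contains g.1 then
        acc ++ tb.filter (fun n => (PySem.Set.ofList g.2).contains n)
      else acc ++ g.2) [] = pvK tb G dr := by
  have hfun : (fun (acc : List String) (g : Int × List String) =>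
      if (PySem.Set.ofList dr).contains g.1 then
        acc ++ tb.filter (fun n => (PySem.Set.ofList g.2).contains n)
      else acc ++ g.2)
      = (fun acc g => acc ++ (if g.1 ∈ dr then pvTF tb g.2 else g.2)) := by
    funext acc g
    by_cases h : g.1 ∈ dr
    · have hc : (PySem.Set.ofList dr).contains g.1 = true := by
        rw [pv_contains_ofList]
        exact List.contains_iff_mem.2 h
      rw [if_pos hc, if_pos h]
      rfl
    · have hc : ¬ (PySem.Set.ofList dr).contains g.1 = true := by
        rw [pv_contains_ofList]
        intro hcc
        exact h (List.contains_iff_mem.1 hcc)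
      rw [if_neg hc, if_neg h]
  rw [hfun, PySem.List.foldl_append_eq_flatMap]
  rw [List.nil_append]
  rfl

-- ===== VERDICT (by name: the statement is the Claim_ definition above) =====
theorem sorting_hat_spec : Claim_equal_sorting_hat := by
  unfold Claim_equal_sorting_hat
  intro sd dr bt _hdom hpre
  obtain ⟨hbt, hdr, hnd⟩ := hpre
  unfold Spec_sorting_hat
  have hperm : (PySem.List.sorted sd (fun item => item.2)).Perm sd :=
    PySem.List.sorted_perm _ _ _
  have hndits : ((PySem.List.sorted sd (fun item => item.2)).map Prod.fst).Nodup :=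
    (hperm.map Prod.fst).nodup_iff.2 hnd
  have hpair : (PySem.List.sorted sd (fun item => item.2)).Pairwise (fun a b => a.2 ≤ b.2) :=
    PySem.List.sorted_pairwise _ _
  have hitems : ((PySem.List.sorted sd (fun item => item.2)).foldl
      (fun d kv => d.insert kv.1 kv.2) PySem.Dict.empty).items
      = PySem.List.sorted sd (fun item => item.2) := by
    have h := PySem.Dict.items_foldl_insert_fresh (PySem.List.sorted sd (fun item => item.2))
      Prod.fst Prod.snd PySem.Dict.empty (fun a _ => PySem.Dict.contains_empty _) hndits
    simpa using h
  have hkeys : ((PySem.List.sorted sd (fun item => item.2)).foldl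
      (fun d kv => d.insert kv.1 kv.2) PySem.Dict.empty).keys
      = (PySem.List.sorted sd (fun item => item.2)).map Prod.fst := by
    simp only [PySem.Dict.keys, hitems]
  have hK0 : ∀ tb : List String,
      pvK tb (pvG (PySem.List.sorted sd (fun item => item.2))) []
      = (PySem.List.sorted sd (fun item => item.2)).map Prod.fst := by
    intro tb
    simp only [pvK, pvG]
    have h1 : ∀ g ∈ (PySem.List.dedup ((PySem.List.sorted sd (fun item => item.2)).map Prod.snd)).map
        (fun s => (s, pvGrp (PySem.List.sorted sd (fun item => item.2)) s)),
        (if g.1 ∈ ([] : List Int) then pvTF tb g.2 else g.2) = g.2 := by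
      intro g _; simp
    rw [pv_flatMap_congr _ _ _ h1]
    rw [List.flatMap_map]
    simp only [pvGrp]
    rw [← List.map_flatMap]
    rw [pv_grouped' _ hpair]
  have hlast : (PySem.List.pyGet? bt ((bt.length : Int) - 1)).getD ""
      = (PySem.List.pyGet? bt (-1)).getD "" := by
    rw [PySem.List.pyGet?_neg_one]
    cases bt with
    | nil => exact absurd rfl hbt
    | cons b bs =>
        have h1 : (((b :: bs).length : Int)) - 1 = ((bs.length : Nat) : Int) := by
          push_cast [List.length_cons]
          ring
        rw [h1, PySem.List.pyGet?_natCast, List.getLast?_eq_getElem?]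
        simp
  have hifA : ∀ (K0 : List String) (F : List String → Int → List String),
      (if 0 < dr.length then dr.foldl F K0 else K0) = dr.foldl F K0 := by
    intro K0 F
    by_cases hpos : 0 < dr.length
    · rw [if_pos hpos]
    · rw [if_neg hpos]
      have h0 : dr.length = 0 := by omega
      have hnil : dr = [] := List.eq_nil_of_length_eq_zero h0
      rw [hnil, List.foldl_nil]
  have hAloop : ∀ tb : List String,
      dr.foldl (pvStep (PySem.List.sorted sd (fun item => item.2)) tb)
        ((PySem.List.sorted sd (fun item => item.2)).map Prod.fst)
      = pvK tb (pvG (PySem.List.sorted sd (fun item => item.2))) dr := by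
    intro tb
    have h := pv_loop (PySem.List.sorted sd (fun item => item.2)) tb hndits dr [] hdr
      (by intro j _; simp)
    rw [List.nil_append] at h
    rw [← hK0 tb]
    exact h
  simp only [sorting_hat, sorting_hat_alt]
  rw [hitems, hkeys, hlast]
  rw [pv_tbloop]
  rw [PySem.List.slice_from_one]
  rw [List.drop_one]
  rw [pv_bfold]
  rw [pv_bfinal]
  rw [hifA]
  exact hAloop _
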